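-- pv_equiv track=rewrite | github.com/arunkjojo/metar-reader | metar_decoder.py | decode_wx_token
-- ===== SOURCE A (Python) =====
-- DESCRIPTORS = {'MI', 'PR', 'BC', 'DR', 'BL', 'SH', 'TS', 'FZ'}
--
-- PHENOMENA = {
--     'DZ', 'RA', 'SN', 'SG', 'IC', 'PL', 'GR', 'GS', 'UP',
--     'BR', 'FG', 'FU', 'VA', 'DU', 'SA', 'HZ', 'PY',
--     'PO', 'SQ', 'FC', 'SS', 'DS'
-- }
--
-- WEATHER_NAMES = {
--     'MI': 'shallow', 'PR': 'partial', 'BC': 'patchy', 'DR': 'drifting',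
--     'BL': 'blowing', 'SH': 'shower', 'TS': 'thunderstorm', 'FZ': 'freezing',
--     'DZ': 'drizzle', 'RA': 'rain', 'SN': 'snow', 'SG': 'snow grains',
--     'IC': 'ice crystals', 'PL': 'ice pellets', 'GR': 'hail', 'GS': 'small hail',
--     'UP': 'unknown precipitation',
--     'BR': 'mist', 'FG': 'fog', 'FU': 'smoke', 'VA': 'volcanic ash',
--     'DU': 'dust', 'SA': 'sand', 'HZ': 'haze', 'PY': 'spray',
--     'PO': 'dust whirls', 'SQ': 'squalls', 'FC': 'tornado/funnel cloud',
--     'SS': 'sandstorm', 'DS': 'dust storm',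
-- }
--
-- def decode_wx_token(token):
--     remaining = token
--     intensity = ''
--
--     if remaining.startswith('+'):
--         intensity = 'heavy'
--         remaining = remaining[1:]
--     elif remaining.startswith('-'):
--         intensity = 'light'
--         remaining = remaining[1:]
--     elif remaining.startswith('VC'):
--         intensity = 'nearby'
--         remaining = remaining[2:]
--
--     descriptor = ''
--     for d in DESCRIPTORS:
--         if remaining.startswith(d):
--             descriptor = WEATHER_NAMES[d]
--             remaining = remaining[len(d):]
--             break
--
--     phens = []
--     while remaining:
--         matched = False
--         for p in sorted(PHENOMENA, key=len, reverse=True):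
--             if remaining.startswith(p):
--                 phens.append(WEATHER_NAMES[p])
--                 remaining = remaining[len(p):]
--                 matched = True
--                 break
--         if not matched:
--             break
--
--     parts = []
--     if intensity:
--         parts.append(intensity)
--     if descriptor:
--         parts.append(descriptor)
--     parts.extend(phens)
--
--     return ' '.join(parts)
-- ===== SOURCE B (Python) =====
-- # Staged decoder: after the intensity prefix, split the tail once into 2-char
-- # chunks (all codes are exactly 2 chars), then consume the chunk LIST: one
-- # optional descriptor lookup at the head, then names for the longest prefix of
-- # phenomenon chunks.  No per-candidate startswith scans (objective: simpler).
--
-- DESC_NAMES = {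
--     'MI': 'shallow', 'PR': 'partial', 'BC': 'patchy', 'DR': 'drifting',
--     'BL': 'blowing', 'SH': 'shower', 'TS': 'thunderstorm', 'FZ': 'freezing',
-- }
--
-- PHEN_NAMES = {
--     'DZ': 'drizzle', 'RA': 'rain', 'SN': 'snow', 'SG': 'snow grains',
--     'IC': 'ice crystals', 'PL': 'ice pellets', 'GR': 'hail', 'GS': 'small hail',
--     'UP': 'unknown precipitation',
--     'BR': 'mist', 'FG': 'fog', 'FU': 'smoke', 'VA': 'volcanic ash',
--     'DU': 'dust', 'SA': 'sand', 'HZ': 'haze', 'PY': 'spray',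
--     'PO': 'dust whirls', 'SQ': 'squalls', 'FC': 'tornado/funnel cloud',
--     'SS': 'sandstorm', 'DS': 'dust storm',
-- }
--
--
-- def decode_wx_token(token):
--     if token.startswith('+'):
--         names, i = ['heavy'], 1
--     elif token.startswith('-'):
--         names, i = ['light'], 1
--     elif token.startswith('VC'):
--         names, i = ['nearby'], 2
--     else:
--         names, i = [], 0
--
--     chunks = []
--     j = i
--     while j < len(token):
--         chunks.append(token[j:j + 2])
--         j += 2
--
--     if chunks and chunks[0] in DESC_NAMES:
--         names.append(DESC_NAMES[chunks[0]])
--         chunks = chunks[1:]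
--
--     for c in chunks:
--         if c not in PHEN_NAMES:
--             break
--         names.append(PHEN_NAMES[c])
--
--     return ' '.join(names)
-- ===== Notes on version B (the rewrite author's own statement) =====
-- stated objective: simpler
-- what changed: A repeatedly rebuilds `remaining` by slicing and scans the candidate code collections with startswith at each step; B splits the tail once into fixed 2-char chunks by a stride-2 index walk and then consumes that chunk list with direct dict lookups (one optional descriptor at the head, then the longest prefix of phenomenon chunks), so the inner candidate scans and suffix copying disappear.
import Mathlib
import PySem

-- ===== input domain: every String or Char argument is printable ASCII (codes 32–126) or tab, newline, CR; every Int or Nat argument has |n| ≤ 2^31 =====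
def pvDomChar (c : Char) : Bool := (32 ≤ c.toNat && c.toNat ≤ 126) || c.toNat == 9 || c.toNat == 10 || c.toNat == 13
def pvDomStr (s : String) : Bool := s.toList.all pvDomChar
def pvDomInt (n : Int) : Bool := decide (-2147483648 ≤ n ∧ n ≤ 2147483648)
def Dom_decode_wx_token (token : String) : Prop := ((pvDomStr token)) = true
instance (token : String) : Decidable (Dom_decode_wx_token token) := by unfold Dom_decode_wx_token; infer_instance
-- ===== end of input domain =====

-- B replaces A's per-position scans over the candidate code collections by a
-- staged pass: split the tail once into 2-char chunks, then consume the chunk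
-- list with direct dict lookups (objective: simpler).

-- ===== PORT A =====
-- A's codes are modelled as their character lists (Python compares char by char).
-- DESCRIPTORS / sorted(PHENOMENA, key=len, reverse=True): the iteration order of
-- the Python set is immaterial to the result (all codes are distinct 2-char
-- strings, so at most one can be a prefix of `remaining`, and the sort by length
-- is trivial); we fix the source-listing order.
def pvDescriptors : List (List Char) :=
  [['M','I'], ['P','R'], ['B','C'], ['D','R'], ['B','L'], ['S','H'], ['T','S'], ['F','Z']]

def pvPhenSorted : List (List Char) :=
  [['D','Z'], ['R','A'], ['S','N'], ['S','G'], ['I','C'], ['P','L'], ['G','R'], ['G','S'], ['U','P'],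
   ['B','R'], ['F','G'], ['F','U'], ['V','A'], ['D','U'], ['S','A'], ['H','Z'], ['P','Y'],
   ['P','O'], ['S','Q'], ['F','C'], ['S','S'], ['D','S']]

-- WEATHER_NAMES: a dict literal with distinct keys, given as its items list.
def pvWeatherNames : PySem.Dict (List Char) String := PySem.Dict.mk
  [(['M','I'], "shallow"), (['P','R'], "partial"), (['B','C'], "patchy"), (['D','R'], "drifting"),
   (['B','L'], "blowing"), (['S','H'], "shower"), (['T','S'], "thunderstorm"), (['F','Z'], "freezing"),
   (['D','Z'], "drizzle"), (['R','A'], "rain"), (['S','N'], "snow"), (['S','G'], "snow grains"),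
   (['I','C'], "ice crystals"), (['P','L'], "ice pellets"), (['G','R'], "hail"), (['G','S'], "small hail"),
   (['U','P'], "unknown precipitation"),
   (['B','R'], "mist"), (['F','G'], "fog"), (['F','U'], "smoke"), (['V','A'], "volcanic ash"),
   (['D','U'], "dust"), (['S','A'], "sand"), (['H','Z'], "haze"), (['P','Y'], "spray"),
   (['P','O'], "dust whirls"), (['S','Q'], "squalls"), (['F','C'], "tornado/funnel cloud"),
   (['S','S'], "sandstorm"), (['D','S'], "dust storm")]

-- WEATHER_NAMES[c] (the key is always present whenever A evaluates it)
def pvWxName (c : List Char) : String := (pvWeatherNames.get? c).getD ""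

-- the `for …: if remaining.startswith(code): … break` scan, shared by both of A's loops
def pvFindCode (codes : List (List Char)) (r : List Char) : Option (List Char) :=
  match codes with
  | [] => none
  | c :: cs => if c.isPrefixOf r then some c else pvFindCode cs r

-- A's `while remaining:` phenomena loop.  The `0 < p.length` test is only a
-- totality guard (every code in pvPhenSorted has length 2); its else-branch is
-- unreachable.
def pvALoop (r : List Char) : List String :=
  if _hr : r = [] then []
  else
    match pvFindCode pvPhenSorted r with
    | none => []
    | some p =>
      if _hp : 0 < p.length then pvWxName p :: pvALoop (r.drop p.length) else []
termination_by r.length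
decreasing_by
  have h1 : r.length ≠ 0 := by simpa using _hr
  simp; omega

def decode_wx_token (token : String) : String :=
  -- remaining[1:] / remaining[2:] after a matched prefix = List.drop 1 / 2 (exact: nonnegative slice)
  let r0 := token.toList
  let ir :=
    if PySem.Chars.startswith r0 ['+'] then ("heavy", r0.drop 1)
    else if PySem.Chars.startswith r0 ['-'] then ("light", r0.drop 1)
    else if PySem.Chars.startswith r0 ['V','C'] then ("nearby", r0.drop 2)
    else ("", r0)
  let dr :=
    match pvFindCode pvDescriptors ir.2 with
    | none => ("", ir.2)
    | some d => (pvWxName d, ir.2.drop d.length)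
  let parts := (if ir.1 ≠ "" then [ir.1] else []) ++ (if dr.1 ≠ "" then [dr.1] else []) ++ pvALoop dr.2
  PySem.Str.join " " parts

-- ===== PORT B =====
-- B's dicts are keyed by the 2-char code STRINGS (B looks up whole chunks).
def pvDescNames : PySem.Dict String String := PySem.Dict.mk
  [("MI", "shallow"), ("PR", "partial"), ("BC", "patchy"), ("DR", "drifting"),
   ("BL", "blowing"), ("SH", "shower"), ("TS", "thunderstorm"), ("FZ", "freezing")]

def pvPhenNames : PySem.Dict String String := PySem.Dict.mk
  [("DZ", "drizzle"), ("RA", "rain"), ("SN", "snow"), ("SG", "snow grains"),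
   ("IC", "ice crystals"), ("PL", "ice pellets"), ("GR", "hail"), ("GS", "small hail"),
   ("UP", "unknown precipitation"),
   ("BR", "mist"), ("FG", "fog"), ("FU", "smoke"), ("VA", "volcanic ash"),
   ("DU", "dust"), ("SA", "sand"), ("HZ", "haze"), ("PY", "spray"),
   ("PO", "dust whirls"), ("SQ", "squalls"), ("FC", "tornado/funnel cloud"),
   ("SS", "sandstorm"), ("DS", "dust storm")]

-- Source B's chunking pass: `j = i; while j < len(token): chunks.append(token[j:j+2]); j += 2`.
-- j stays nonnegative (it starts at i ∈ {0,1,2} and only grows), so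
-- token[j:j+2] = (t.drop j).take 2 exactly (PySem.List.slice_natCast_add).
def pvChunksFrom (t : List Char) (j : Nat) : List String :=
  if _h : j < t.length then
    String.ofList ((t.drop j).take 2) :: pvChunksFrom t (j + 2)
  else []
termination_by t.length - j

-- Source B's `for c in chunks: if c not in PHEN_NAMES: break; names.append(…)`
def pvPhenPrefix (chunks : List String) : List String :=
  match chunks with
  | [] => []
  | c :: rest =>
    match pvPhenNames.get? c with
    | none => []
    | some n => n :: pvPhenPrefix rest

def decode_wx_token_alt (token : String) : String :=
  let t := token.toList
  let pr :=
    if PySem.Chars.startswith t ['+'] then (["heavy"], 1)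
    else if PySem.Chars.startswith t ['-'] then (["light"], 1)
    else if PySem.Chars.startswith t ['V','C'] then (["nearby"], 2)
    else ([], 0)
  let chunks := pvChunksFrom t pr.2
  let st :=
    match chunks with
    | [] => (pr.1, chunks)
    | c :: rest =>
      match pvDescNames.get? c with
      | some n => (pr.1 ++ [n], rest)
      | none => (pr.1, chunks)
  PySem.Str.join " " (st.1 ++ pvPhenPrefix st.2)

-- ===== PRECONDITION & SPEC =====
def Spec_decode_wx_token (token : String) (out : String) : Prop := out = decode_wx_token_alt token
instance (token : String) (out : String) : Decidable (Spec_decode_wx_token token out) := by unfold Spec_decode_wx_token; infer_instance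

-- ===== CLAIM (what is proved, stated in full; the proofs are below) =====
def Claim_equal_decode_wx_token : Prop := ∀ (token : String), Dom_decode_wx_token token → Spec_decode_wx_token token (decode_wx_token token)

-- ===== LEMMAS AND PROOFS =====

-- proof-side view of the chunking pass: recursion on the remaining suffix
def pvChunks2 (l : List Char) : List String :=
  if _h : l = [] then []
  else String.ofList (l.take 2) :: pvChunks2 (l.drop 2)
termination_by l.length
decreasing_by
  have h1 : l.length ≠ 0 := by simpa using _h
  simp; omega

theorem pvChunks2_nil : pvChunks2 [] = [] := by unfold pvChunks2; simp

theorem pvChunks2_cons (l : List Char) (h : ¬ l = []) :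
    pvChunks2 l = String.ofList (l.take 2) :: pvChunks2 (l.drop 2) := by
  conv_lhs => rw [pvChunks2]
  simp [h]

theorem pvChunksFrom_eq_aux (n : Nat) : ∀ (t : List Char) (j : Nat), t.length - j ≤ n →
    pvChunksFrom t j = pvChunks2 (t.drop j) := by
  induction n with
  | zero =>
    intro t j hj
    have hle : t.length ≤ j := by omega
    rw [pvChunksFrom, dif_neg (by omega), List.drop_eq_nil_of_le hle, pvChunks2_nil]
  | succ n ih =>
    intro t j hj
    by_cases h : j < t.length
    · have hne : ¬ t.drop j = [] := by
        simp [List.drop_eq_nil_iff]; omega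
      rw [pvChunksFrom, dif_pos h, pvChunks2_cons _ hne, List.drop_drop,
        ih t (j + 2) (by omega)]
    · rw [pvChunksFrom, dif_neg h, List.drop_eq_nil_of_le (by omega), pvChunks2_nil]

theorem pvChunksFrom_eq (t : List Char) (j : Nat) :
    pvChunksFrom t j = pvChunks2 (t.drop j) :=
  pvChunksFrom_eq_aux (t.length - j) t j (le_refl _)

theorem pvBeq_ofList (l s : List Char) : (String.ofList l == String.ofList s) = (l == s) := by
  rw [Bool.eq_iff_iff, beq_iff_eq, beq_iff_eq, String.ofList_inj]

-- a String-keyed literal dict looked up at an ofList key = find? over items at char level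
theorem pvGet?_ofList_chars (ps : List (String × String)) (l : List Char) :
    (PySem.Dict.mk ps).get? (String.ofList l)
      = (List.find? (fun p => p.1.toList == l) ps).map (·.2) := by
  induction ps with
  | nil => simp [PySem.Dict.get?]
  | cons p ps ih =>
    rw [PySem.Dict.get?_mk_cons, List.find?_cons]
    have hk : (p.1 == String.ofList l) = (p.1.toList == l) := by
      conv_lhs => rw [← String.ofList_toList (s := p.1)]
      exact pvBeq_ofList _ _
    rw [hk]
    cases hb : (p.1.toList == l) with
    | true => simp
    | false => simpa using ih

theorem pvFind_none_of_len (ps : List (String × String))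
    (hl : ∀ p ∈ ps, p.1.toList.length = 2) (l : List Char) (h : l.length ≠ 2) :
    List.find? (fun p => p.1.toList == l) ps = none := by
  induction ps with
  | nil => rfl
  | cons p ps ih =>
    have hne0 : (p.1.toList == l) = false := by
      have h2 : p.1.toList.length = 2 := hl p (by simp)
      by_contra hb
      have : p.1.toList = l := by
        cases hbb : (p.1.toList == l) with
        | true => exact eq_of_beq hbb
        | false => exact absurd hbb hb
      exact h (by rw [← this, h2])
    rw [List.find?_cons, hne0]
    exact ih (fun q hq => hl q (by simp [hq]))

theorem pvFindCode_mem {codes : List (List Char)} {r c : List Char}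
    (h : pvFindCode codes r = some c) : c ∈ codes := by
  induction codes with
  | nil => simp [pvFindCode] at h
  | cons d cs ih =>
    unfold pvFindCode at h
    split at h
    · simp_all
    · exact List.mem_cons_of_mem _ (ih h)

-- A's scan over the char-level codes of a 2-char-keyed table, on a string of
-- length ≥ 2, agrees with find? over the table's items.
theorem pvFind_assoc (ps : List (String × String)) (f : List Char → String)
    (hf : ∀ p ∈ ps, f p.1.toList = p.2) (hl : ∀ p ∈ ps, p.1.toList.length = 2)
    (a b : Char) (rest : List Char) :
    (pvFindCode (ps.map (fun p => p.1.toList)) (a :: b :: rest)).map f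
      = (List.find? (fun p => p.1.toList == [a, b]) ps).map (·.2) := by
  induction ps with
  | nil => simp [pvFindCode]
  | cons p ps ih =>
    have hk2 : p.1.toList.length = 2 := hl p (by simp)
    match hk : p.1.toList, hk2 with
    | [x, y], _ =>
      by_cases h : x = a ∧ y = b
      · obtain ⟨rfl, rfl⟩ := h
        have hfp := hf p (by simp)
        rw [hk] at hfp
        simp [pvFindCode, hk, List.isPrefixOf, hfp]
      · have hne : ¬([x, y] == [a, b]) = true := by simp_all
        have hpre : ([x, y].isPrefixOf (a :: b :: rest)) = false := by
          simp [List.isPrefixOf]; tauto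
        simp only [List.map_cons, pvFindCode, hk, hpre, List.find?_cons, hne,
          Bool.false_eq_true, if_false]
        exact ih (fun q hq => hf q (by simp [hq])) (fun q hq => hl q (by simp [hq]))

theorem pvDesc_step (r : List Char) :
    (pvFindCode pvDescriptors r).map pvWxName = pvDescNames.get? (String.ofList (r.take 2)) := by
  have hlen : ∀ p ∈ pvDescNames.items, p.1.toList.length = 2 := by decide
  match r with
  | [] =>
    rw [show pvDescNames.get? (String.ofList (([] : List Char).take 2))
          = (List.find? (fun p => p.1.toList == (([] : List Char).take 2)) pvDescNames.items).map (·.2)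
        from pvGet?_ofList_chars _ _,
      pvFind_none_of_len pvDescNames.items hlen _ (by simp)]
    decide
  | [a] =>
    rw [show pvDescNames.get? (String.ofList ([a].take 2))
          = (List.find? (fun p => p.1.toList == ([a].take 2)) pvDescNames.items).map (·.2)
        from pvGet?_ofList_chars _ _,
      pvFind_none_of_len pvDescNames.items hlen _ (by simp)]
    simp [pvFindCode, pvDescriptors, List.isPrefixOf]
  | a :: b :: rest =>
    have hcodes : pvDescriptors = pvDescNames.items.map (fun p => p.1.toList) := by decide
    have h := pvFind_assoc pvDescNames.items pvWxName (by decide) hlen a b rest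
    rw [hcodes, show pvDescNames.get? (String.ofList ((a :: b :: rest).take 2))
          = (List.find? (fun p => p.1.toList == (a :: b :: rest).take 2) pvDescNames.items).map (·.2)
        from pvGet?_ofList_chars _ _]
    simpa using h

theorem pvPhen_step (r : List Char) :
    (pvFindCode pvPhenSorted r).map pvWxName = pvPhenNames.get? (String.ofList (r.take 2)) := by
  have hlen : ∀ p ∈ pvPhenNames.items, p.1.toList.length = 2 := by decide
  match r with
  | [] =>
    rw [show pvPhenNames.get? (String.ofList (([] : List Char).take 2))
          = (List.find? (fun p => p.1.toList == (([] : List Char).take 2)) pvPhenNames.items).map (·.2)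
        from pvGet?_ofList_chars _ _,
      pvFind_none_of_len pvPhenNames.items hlen _ (by simp)]
    decide
  | [a] =>
    rw [show pvPhenNames.get? (String.ofList ([a].take 2))
          = (List.find? (fun p => p.1.toList == ([a].take 2)) pvPhenNames.items).map (·.2)
        from pvGet?_ofList_chars _ _,
      pvFind_none_of_len pvPhenNames.items hlen _ (by simp)]
    simp [pvFindCode, pvPhenSorted, List.isPrefixOf]
  | a :: b :: rest =>
    have hcodes : pvPhenSorted = pvPhenNames.items.map (fun p => p.1.toList) := by decide
    have h := pvFind_assoc pvPhenNames.items pvWxName (by decide) hlen a b rest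
    rw [hcodes, show pvPhenNames.get? (String.ofList ((a :: b :: rest).take 2))
          = (List.find? (fun p => p.1.toList == (a :: b :: rest).take 2) pvPhenNames.items).map (·.2)
        from pvGet?_ofList_chars _ _]
    simpa using h

theorem pvALoop_nil : pvALoop [] = [] := by unfold pvALoop; simp

theorem pvALoop_cons (r : List Char) (h : ¬ r = []) :
    pvALoop r = match pvFindCode pvPhenSorted r with
      | none => []
      | some p => if 0 < p.length then pvWxName p :: pvALoop (r.drop p.length) else [] := by
  conv_lhs => rw [pvALoop]
  simp [h]

-- A's phenomena loop over the chars = B's prefix-take over the chunk list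
theorem pvLoop_eq_aux (n : Nat) : ∀ r : List Char, r.length ≤ n →
    pvALoop r = pvPhenPrefix (pvChunks2 r) := by
  induction n with
  | zero =>
    intro r hr
    have hr0 : r = [] := by cases r <;> simp_all
    rw [hr0, pvALoop_nil, pvChunks2_nil]
    rfl
  | succ n ih =>
    intro r hr
    by_cases hnil : r = []
    · rw [hnil, pvALoop_nil, pvChunks2_nil]; rfl
    · rw [pvALoop_cons r hnil, pvChunks2_cons r hnil]
      have hstep := pvPhen_step r
      cases hf : pvFindCode pvPhenSorted r with
      | none =>
        rw [hf] at hstep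
        simp only [Option.map_none] at hstep
        simp [pvPhenPrefix, ← hstep]
      | some p =>
        rw [hf] at hstep
        simp only [Option.map_some] at hstep
        have hp2 : p.length = 2 := by
          have hm := pvFindCode_mem hf
          have hall : ∀ c ∈ pvPhenSorted, c.length = 2 := by decide
          exact hall p hm
        have hrec : (r.drop 2).length ≤ n := by
          have : r.length ≠ 0 := by simpa using hnil
          simp; omega
        simp only [pvPhenPrefix, ← hstep, hp2]
        rw [ih (r.drop 2) hrec]
        simp

theorem pvLoop_eq (r : List Char) : pvALoop r = pvPhenPrefix (pvChunks2 r) :=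
  pvLoop_eq_aux r.length r (le_refl _)

theorem pvDescName_ne {s : String} {n : String}
    (h : pvDescNames.get? s = some n) : n ≠ "" := by
  have hi : (s, n) ∈ pvDescNames.items := PySem.Dict.mem_items_of_get?_eq_some pvDescNames h
  have hv : n ∈ pvDescNames.values := by
    simpa [PySem.Dict.values] using List.mem_map_of_mem (f := Prod.snd) hi
  have hall : ∀ m ∈ pvDescNames.values, m ≠ "" := by decide
  exact hall n hv

-- the whole body after the intensity branch, for matching intensity parts
theorem pvBody (ints : String) (preB : List String)
    (hpre : (if ints ≠ "" then [ints] else []) = preB) (r : List Char) :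
    PySem.Str.join " " ((if ints ≠ "" then [ints] else []) ++
      ((if (match pvFindCode pvDescriptors r with
            | none => (("" : String), r)
            | some d => (pvWxName d, r.drop d.length)).1 ≠ "" then
          [(match pvFindCode pvDescriptors r with
            | none => (("" : String), r)
            | some d => (pvWxName d, r.drop d.length)).1] else []) ++
        pvALoop (match pvFindCode pvDescriptors r with
            | none => (("" : String), r)
            | some d => (pvWxName d, r.drop d.length)).2))
    = PySem.Str.join " " ((match pvChunks2 r with
          | [] => (preB, pvChunks2 r)
          | c :: rest =>
            match pvDescNames.get? c with
            | some n => (preB ++ [n], rest)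
            | none => (preB, pvChunks2 r)).1 ++
         pvPhenPrefix (match pvChunks2 r with
          | [] => (preB, pvChunks2 r)
          | c :: rest =>
            match pvDescNames.get? c with
            | some n => (preB ++ [n], rest)
            | none => (preB, pvChunks2 r)).2) := by
  rw [hpre]
  by_cases hnil : r = []
  · subst hnil
    have : pvFindCode pvDescriptors [] = none := by decide
    simp [this, pvChunks2_nil, pvALoop_nil, pvPhenPrefix, PySem.Str.join]
  · rw [pvChunks2_cons r hnil]
    have hstep := pvDesc_step r
    cases hf : pvFindCode pvDescriptors r with
    | none =>
      rw [hf] at hstep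
      simp only [Option.map_none] at hstep
      simp [pvChunks2_cons r hnil, ← hstep, pvLoop_eq, PySem.Str.join]
    | some d =>
      rw [hf] at hstep
      simp only [Option.map_some] at hstep
      have hd2 : d.length = 2 := by
        have hm := pvFindCode_mem hf
        have hall : ∀ c ∈ pvDescriptors, c.length = 2 := by decide
        exact hall d hm
      simp [← hstep, hd2, pvDescName_ne hstep.symm, pvLoop_eq, PySem.Str.join]

-- ===== VERDICT (by name: the statement is the Claim_ definition above) =====
theorem decode_wx_token_spec : Claim_equal_decode_wx_token := by
  intro token _
  unfold Spec_decode_wx_token decode_wx_token decode_wx_token_alt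
  by_cases h1 : PySem.Chars.startswith token.toList ['+'] = true
  · simp only [h1, if_true]
    have hB := pvBody "heavy" ["heavy"] (by simp) (token.toList.drop 1)
    rw [← pvChunksFrom_eq token.toList 1] at hB
    exact hB
  · simp only [h1]
    by_cases h2 : PySem.Chars.startswith token.toList ['-'] = true
    · simp only [h2, if_true]
      have hB := pvBody "light" ["light"] (by simp) (token.toList.drop 1)
      rw [← pvChunksFrom_eq token.toList 1] at hB
      exact hB
    · simp only [h2]
      by_cases h3 : PySem.Chars.startswith token.toList ['V','C'] = true
      · simp only [h3, if_true]
        have hB := pvBody "nearby" ["nearby"] (by simp) (token.toList.drop 2)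
        rw [← pvChunksFrom_eq token.toList 2] at hB
        exact hB
      · simp only [h3]
        have hB := pvBody "" [] (by simp) (token.toList.drop 0)
        rw [← pvChunksFrom_eq token.toList 0] at hB
        exact hB
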